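-- pv_equiv track=rewrite | github.com/Qiskit/documentation | binder/fix-notebooks.py | _add_shell_prefix
-- ===== SOURCE A (Python) =====
-- def _add_shell_prefix(code: str) -> str:
--     """Prepend ! to each command line for Jupyter shell execution."""
--     lines = code.split("\n")
--     result = []
--     for line in lines:
--         s = line.strip()
--         if s == "" or s.startswith("#"):
--             result.append(line)
--         else:
--             result.append("!" + line)
--     return "\n".join(result)
-- ===== SOURCE B (Python) =====
-- def _needs_bang(code, i):
--     n = len(code)
--     while i < n:
--         c = code[i]
--         if c == '\n':
--             return False
--         if c.isspace():
--             i += 1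
--             continue
--         return c != '#'
--     return False
--
--
-- def _add_shell_prefix(code: str) -> str:
--     out = []
--     at_start = True
--     for i, c in enumerate(code):
--         if at_start and _needs_bang(code, i):
--             out.append('!')
--         out.append(c)
--         at_start = c == '\n'
--     return ''.join(out)
-- ===== Notes on version B (the rewrite author's own statement) =====
-- stated objective: alternative
-- what changed: Replaces A's split-into-lines / per-line strip test / join pipeline with a single streaming pass over the characters that tracks a line-start flag and uses a bounded whitespace lookahead to decide whether to insert '!'.
import Mathlib
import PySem

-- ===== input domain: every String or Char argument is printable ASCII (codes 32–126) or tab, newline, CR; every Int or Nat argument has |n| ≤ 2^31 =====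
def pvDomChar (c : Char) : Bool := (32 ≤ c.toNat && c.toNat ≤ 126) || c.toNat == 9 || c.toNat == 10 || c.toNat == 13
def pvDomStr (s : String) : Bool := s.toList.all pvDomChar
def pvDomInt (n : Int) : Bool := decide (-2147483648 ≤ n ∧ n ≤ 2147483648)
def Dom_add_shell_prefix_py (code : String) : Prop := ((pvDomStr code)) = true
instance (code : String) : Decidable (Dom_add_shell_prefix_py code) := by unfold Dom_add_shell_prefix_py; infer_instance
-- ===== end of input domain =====

-- B replaces A's split/strip/join pipeline by a single streaming pass over the characters
-- with a line-start flag and a bounded whitespace lookahead (objective: alternative).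


-- ===== PORT A =====
-- the body of A's for-loop: keep blank / comment lines, prefix '!' otherwise
def aProcessLine (line : List Char) : List Char :=
  let s := PySem.Chars.strip line
  if s = [] ∨ PySem.Chars.startswith s ['#'] = true then line else '!' :: line

def add_shell_prefix_py (code : String) : String :=
  String.mk (PySem.Chars.join ['\n']
    ((PySem.Chars.splitOn code.toList ['\n']).map aProcessLine))

-- ===== PORT B =====
-- B's lookahead `_needs_bang`: skip non-newline whitespace; bang iff a non-'\n', non-'#' char follows
def bNeeds : List Char → Bool
  | [] => false
  | c :: cs =>
    if c == '\n' then false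
    else if PySem.Chars.isspace c then bNeeds cs
    else c != '#'

-- B's single pass with the at_start flag
def bGo : List Char → Bool → List Char
  | [], _ => []
  | c :: cs, atStart =>
    (if atStart && bNeeds (c :: cs) then ['!'] else []) ++ c :: bGo cs (c == '\n')

def add_shell_prefix_py_alt (code : String) : String :=
  String.mk (bGo code.toList true)

-- ===== PRECONDITION & SPEC =====
def Spec_add_shell_prefix_py (code : String) (out : String) : Prop := out = add_shell_prefix_py_alt code
instance (code : String) (out : String) : Decidable (Spec_add_shell_prefix_py code out) := by unfold Spec_add_shell_prefix_py; infer_instance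

-- ===== CLAIM (what is proved, stated in full; the proofs are below) =====
def Claim_equal_add_shell_prefix_py : Prop := ∀ (code : String), Dom_add_shell_prefix_py code → Spec_add_shell_prefix_py code (add_shell_prefix_py code)

-- ===== LEMMAS AND PROOFS =====

-- reference splitter: split a char list at every '\n' (always returns a nonempty list)
def mySplit : List Char → List (List Char)
  | [] => [[]]
  | c :: cs =>
    match mySplit cs with
    | [] => [[]]
    | x :: xs => if c = '\n' then [] :: x :: xs else (c :: x) :: xs

-- the first line of a char list (everything before the first '\n')
def firstLine : List Char → List Char
  | [] => []
  | c :: cs => if c = '\n' then [] else c :: firstLine cs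

theorem mySplit_ne_nil (l : List Char) : mySplit l ≠ [] := by
  cases l with
  | nil => simp [mySplit]
  | cons c cs =>
    simp only [mySplit]
    rcases h : mySplit cs with _ | ⟨x, xs⟩ <;> split_ifs <;> simp

theorem firstLine_head : ∀ l : List Char, firstLine l = (mySplit l).headD [] := by
  intro l
  induction l with
  | nil => rfl
  | cons c cs ih =>
    rcases hm : mySplit cs with _ | ⟨x, xs⟩
    · exact absurd hm (mySplit_ne_nil cs)
    · by_cases hc : c = '\n' <;> simp [firstLine, mySplit, hm, hc, ih]

-- A's splitOn agrees with the reference splitter on separator "\n"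
theorem go_spec : ∀ (fuel : Nat) (l cur acc : _),
    l.length < fuel →
    PySem.Chars.splitOn.go ['\n'] fuel l cur acc =
      acc.reverse ++ (match mySplit l with
        | [] => []
        | x :: xs => (cur.reverse ++ x) :: xs) := by
  intro fuel
  induction fuel with
  | zero => intro l cur acc h; omega
  | succ f ih =>
    intro l cur acc h
    cases l with
    | nil =>
      show ((cur.reverse :: acc).reverse) = _
      simp [mySplit]
    | cons c cs =>
      show (if ['\n'].isPrefixOf (c :: cs) then
              PySem.Chars.splitOn.go ['\n'] f (List.drop ['\n'].length (c :: cs)) [] (cur.reverse :: acc)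
            else PySem.Chars.splitOn.go ['\n'] f cs (c :: cur) acc) = _
      by_cases hc : c = '\n'
      · subst hc
        have hpre : ['\n'].isPrefixOf ('\n' :: cs) = true := by
          simp [List.isPrefixOf]
        rw [if_pos hpre]
        rw [show List.drop ['\n'].length ('\n' :: cs) = cs from rfl]
        rw [ih cs [] (cur.reverse :: acc) (by simpa using Nat.lt_of_succ_lt_succ h)]
        rcases hm : mySplit cs with _ | ⟨x, xs⟩
        · exact absurd hm (mySplit_ne_nil cs)
        · simp [mySplit, hm]
      · have hpre : ['\n'].isPrefixOf (c :: cs) = false := by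
          simp [List.isPrefixOf]
          intro hct
          exact absurd hct.symm hc
        rw [if_neg (by simp [hpre])]
        rw [ih cs (c :: cur) acc (by simpa using Nat.lt_of_succ_lt_succ h)]
        rcases hm : mySplit cs with _ | ⟨x, xs⟩
        · exact absurd hm (mySplit_ne_nil cs)
        · simp [mySplit, hm, hc]

theorem splitOn_newline (l : List Char) :
    PySem.Chars.splitOn l ['\n'] = mySplit l := by
  have h := go_spec (l.length + 1) l [] [] (by omega)
  rcases hm : mySplit l with _ | ⟨x, xs⟩
  · exact absurd hm (mySplit_ne_nil l)
  · rw [hm] at h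
    simpa [PySem.Chars.splitOn] using h

-- stripping: cons of a non-whitespace char passes through rstrip
theorem rstrip_cons_not_ws (c : Char) (y : List Char) (h : PySem.Chars.isspace c = false) :
    PySem.Chars.rstrip (c :: y) = c :: PySem.Chars.rstrip y := by
  unfold PySem.Chars.rstrip
  rw [show (c :: y).reverse = y.reverse ++ [c] by simp]
  rw [List.dropWhile_append]
  rcases hd : List.dropWhile PySem.Chars.isspace y.reverse with _ | ⟨a, t⟩
  · simp [List.dropWhile, h]
  · simp

-- B's lookahead decides exactly A's "blank or comment" test on the first line
theorem bNeeds_char : ∀ l : List Char,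
    bNeeds l = true ↔
      ¬ (PySem.Chars.strip (firstLine l) = [] ∨
         PySem.Chars.startswith (PySem.Chars.strip (firstLine l)) ['#'] = true) := by
  intro l
  induction l with
  | nil =>
    simp [bNeeds, firstLine, PySem.Chars.strip, PySem.Chars.lstrip, PySem.Chars.rstrip]
  | cons c cs ih =>
    by_cases hc : c = '\n'
    · subst hc
      simp [bNeeds, firstLine, PySem.Chars.strip, PySem.Chars.lstrip, PySem.Chars.rstrip]
    · by_cases hw : PySem.Chars.isspace c = true
      · have h1 : bNeeds (c :: cs) = bNeeds cs := by
          simp [bNeeds, hc, hw]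
        have h2 : PySem.Chars.strip (firstLine (c :: cs)) = PySem.Chars.strip (firstLine cs) := by
          simp [firstLine, hc, PySem.Chars.strip, PySem.Chars.lstrip, hw]
        rw [h1, h2]
        exact ih
      · have hw' : PySem.Chars.isspace c = false := by simpa using hw
        have hfl : firstLine (c :: cs) = c :: firstLine cs := by simp [firstLine, hc]
        have hst : PySem.Chars.strip (firstLine (c :: cs)) =
            c :: PySem.Chars.rstrip (firstLine cs) := by
          rw [hfl]
          unfold PySem.Chars.strip
          rw [show PySem.Chars.lstrip (c :: firstLine cs) = c :: firstLine cs by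
            simp [PySem.Chars.lstrip, List.dropWhile, hw']]
          exact rstrip_cons_not_ws c (firstLine cs) hw'
        rw [hst]
        have h1 : bNeeds (c :: cs) = (c != '#') := by
          simp [bNeeds, hc, hw']
        rw [h1]
        have hsw : PySem.Chars.startswith (c :: PySem.Chars.rstrip (firstLine cs)) ['#']
            = ('#' == c) := by
          simp [PySem.Chars.startswith, List.isPrefixOf]
        rw [hsw]
        simp only [bne_iff_ne, ne_eq, List.cons_ne_nil, false_or, beq_iff_eq]
        constructor
        · intro h' h''
          exact h' h''.symm
        · intro h' h''
          exact h' h''.symm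

theorem aProcess_firstLine (l : List Char) :
    aProcessLine (firstLine l) = (if bNeeds l then ['!'] else []) ++ firstLine l := by
  by_cases h : bNeeds l = true
  · have := (bNeeds_char l).mp h
    simp [aProcessLine, h, this]
  · have hb : bNeeds l = false := by simpa using h
    have : PySem.Chars.strip (firstLine l) = [] ∨
        PySem.Chars.startswith (PySem.Chars.strip (firstLine l)) ['#'] = true := by
      by_contra hcon
      exact h ((bNeeds_char l).mpr hcon)
    simp [aProcessLine, hb, this]

-- join helper
theorem join_cons_cons (a b : List Char) (t : List (List Char)) :
    PySem.Chars.join ['\n'] (a :: b :: t) = a ++ '\n' :: PySem.Chars.join ['\n'] (b :: t) := by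
  simp [PySem.Chars.join, List.intercalate, List.intersperse]

theorem aProcess_nil : aProcessLine [] = [] := by
  simp [aProcessLine, PySem.Chars.strip, PySem.Chars.lstrip, PySem.Chars.rstrip]

-- the main invariant of B's single pass
theorem bGo_join : ∀ l : List Char,
    bGo l true = PySem.Chars.join ['\n'] ((mySplit l).map aProcessLine) ∧
    bGo l false = PySem.Chars.join ['\n']
      (((mySplit l).headD []) :: ((mySplit l).tail).map aProcessLine) := by
  intro l
  induction l with
  | nil =>
    constructor
    · simp [bGo, mySplit, aProcess_nil]
    · simp [bGo, mySplit]
  | cons c cs ih =>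
    obtain ⟨ih1, ih2⟩ := ih
    rcases hm : mySplit cs with _ | ⟨x, xs⟩
    · exact absurd hm (mySplit_ne_nil cs)
    · by_cases hc : c = '\n'
      · subst hc
        have hbn : bNeeds ('\n' :: cs) = false := by simp [bNeeds]
        have hms : mySplit ('\n' :: cs) = [] :: x :: xs := by simp [mySplit, hm]
        have hbody : bGo cs ('\n' == '\n') = bGo cs true := by norm_num
        constructor
        · show (if (true && bNeeds ('\n' :: cs)) then ['!'] else []) ++
              '\n' :: bGo cs ('\n' == '\n') = _
          rw [hbn, hbody, ih1, hms, hm]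
          simp [join_cons_cons, aProcess_nil]
        · show (if (false && bNeeds ('\n' :: cs)) then ['!'] else []) ++
              '\n' :: bGo cs ('\n' == '\n') = _
          rw [hbody, ih1, hms, hm]
          simp [join_cons_cons]
      · have hms : mySplit (c :: cs) = (c :: x) :: xs := by simp [mySplit, hm, hc]
        have hbody : bGo cs (c == '\n') = bGo cs false := by
          have : (c == '\n') = false := by simpa using hc
          rw [this]
        have hax : aProcessLine (c :: x) =
            (if bNeeds (c :: cs) then ['!'] else []) ++ (c :: x) := by
          have h1 := aProcess_firstLine (c :: cs)
          have h2 : firstLine (c :: cs) = c :: x := by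
            rw [show firstLine (c :: cs) = c :: firstLine cs by simp [firstLine, hc],
                firstLine_head cs, hm]
            rfl
          rw [h2] at h1
          exact h1
        constructor
        · show (if (true && bNeeds (c :: cs)) then ['!'] else []) ++
              c :: bGo cs (c == '\n') = _
          rw [hbody, ih2, hms, hm]
          simp only [List.map_cons, hax, List.headD_cons, List.tail_cons, Bool.true_and]
          cases xs with
          | nil => simp
          | cons b t => simp [join_cons_cons]
        · show (if (false && bNeeds (c :: cs)) then ['!'] else []) ++
              c :: bGo cs (c == '\n') = _
          rw [hbody, ih2, hms, hm]
          simp only [List.headD_cons, List.tail_cons, Bool.false_and,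
            if_neg Bool.false_ne_true, List.nil_append]
          cases xs with
          | nil => simp
          | cons b t => simp [join_cons_cons]

-- ===== VERDICT (by name: the statement is the Claim_ definition above) =====
theorem add_shell_prefix_py_spec : Claim_equal_add_shell_prefix_py := by
  intro code _
  show add_shell_prefix_py code = add_shell_prefix_py_alt code
  unfold add_shell_prefix_py add_shell_prefix_py_alt
  rw [splitOn_newline, (bGo_join code.toList).1]
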